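-- pv_equiv track=rewrite | github.com/MiheretuTesh/competitve_programming_A2SV | Lab_practices/bootcamp_week_1/contest/New And Hurry.py | NewYearHurry
-- ===== SOURCE A (Python) =====
-- def NewYearHurry(arr):
--     lm = arr[0]
--     mn = arr[-1]
--     arr1 = []
--     count = 0
--     totalTime = 240
--     curr = totalTime - mn
--     for i in range(1, lm+1):
--         arr1.append(i*5)
--     for i in arr1:
--         if(curr >= i):
--             curr -= i
--             count += 1
--         else:
--             break
--     return count
-- ===== SOURCE B (Python) =====
-- def NewYearHurry(arr):
--     lm = arr[0]
--     curr = 240 - arr[-1]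
--     if lm <= 0 or curr < 0:
--         return 0
--     lo, hi = 0, lm
--     while lo < hi:
--         mid = (lo + hi + 1) // 2
--         if 5 * mid * (mid + 1) // 2 <= curr:
--             lo = mid
--         else:
--             hi = mid - 1
--     return lo
-- ===== Notes on version B (the rewrite author's own statement) =====
-- stated objective: alternative
-- what changed: Replaces A's linear loop (building the per-problem cost list 5,10,15,... and subtracting prefix sums one by one) by a binary search for the largest k whose total cost 5*k*(k+1)/2 fits the remaining time 240 minus the last element, capped at the first element.
-- outside the precondition, e.g. on NewYearHurry([]): A raises IndexError, B raises IndexError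
import Mathlib
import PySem

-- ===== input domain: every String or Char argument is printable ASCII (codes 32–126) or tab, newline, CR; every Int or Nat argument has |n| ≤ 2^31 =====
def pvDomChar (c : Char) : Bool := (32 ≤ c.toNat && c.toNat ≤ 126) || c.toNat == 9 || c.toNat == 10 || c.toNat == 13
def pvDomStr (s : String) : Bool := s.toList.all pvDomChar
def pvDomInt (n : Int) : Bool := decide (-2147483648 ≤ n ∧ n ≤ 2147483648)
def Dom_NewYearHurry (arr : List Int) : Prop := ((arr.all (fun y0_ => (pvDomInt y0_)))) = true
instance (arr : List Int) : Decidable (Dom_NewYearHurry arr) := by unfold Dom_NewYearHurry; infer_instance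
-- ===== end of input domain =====

-- B replaces A's simulate-every-problem loop by a binary search for the largest k
-- whose total cost 5*k*(k+1)/2 fits the remaining time budget, capped at lm: objective alternative.

-- ===== PORT A =====
-- the second for-loop of A, with `break` rendered as returning the count
def loopA : List Int → Int → Int → Int
  | [], _, count => count
  | i :: rest, curr, count =>
      if curr ≥ i then loopA rest (curr - i) (count + 1) else count

def NewYearHurry (arr : List Int) : Int :=
  let lm := PySem.List.pyGetD arr 0 0
  let mn := PySem.List.pyGetD arr (-1) 0
  let curr := 240 - mn
  let arr1 := (PySem.List.pyRange 1 (lm + 1) 1).map (fun i => i * 5)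
  loopA arr1 curr 0

-- ===== PORT B =====
-- midpoint (lo + hi + 1) // 2, named so the termination argument can cite its bounds
def midB (lo hi : Int) : Int := PySem.Int.floordiv (lo + hi + 1) 2

-- the while loop as structural recursion on fuel; (hi - lo).toNat fuel is enough,
-- since hi - lo strictly shrinks every iteration
def bsearchB (curr : Int) : Nat → Int → Int → Int
  | 0, lo, _ => lo
  | fuel + 1, lo, hi =>
    if lo < hi then
      let mid := midB lo hi
      if PySem.Int.floordiv (5 * mid * (mid + 1)) 2 ≤ curr then
        bsearchB curr fuel mid hi
      else
        bsearchB curr fuel lo (mid - 1)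
    else lo

def NewYearHurry_alt (arr : List Int) : Int :=
  let lm := PySem.List.pyGetD arr 0 0
  let curr := 240 - PySem.List.pyGetD arr (-1) 0
  if lm ≤ 0 ∨ curr < 0 then 0 else bsearchB curr lm.toNat 0 lm

-- ===== PRECONDITION & SPEC =====
-- A raises IndexError on the empty list (arr[0]); excluded.
def Pre_NewYearHurry (arr : List Int) : Prop := arr ≠ []
instance (arr : List Int) : Decidable (Pre_NewYearHurry arr) := by unfold Pre_NewYearHurry; infer_instance
def pvWitness_NewYearHurry : List Int := [3, 20]

def Spec_NewYearHurry (arr : List Int) (out : Int) : Prop := out = NewYearHurry_alt arr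
instance (arr : List Int) (out : Int) : Decidable (Spec_NewYearHurry arr out) := by unfold Spec_NewYearHurry; infer_instance

-- ===== CLAIM (what is proved, stated in full; the proofs are below) =====
def Claim_equal_NewYearHurry : Prop := ∀ (arr : List Int), Dom_NewYearHurry arr → Pre_NewYearHurry arr → Spec_NewYearHurry arr (NewYearHurry arr)

-- ===== LEMMAS AND PROOFS =====

theorem midB_bounds {lo hi : Int} (h : lo < hi) : lo < midB lo hi ∧ midB lo hi ≤ hi := by
  unfold midB
  rw [PySem.Int.floordiv_eq_ediv_of_pos (by omega)]
  omega

-- r is the answer for budget curr on the index interval [lo, hi]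
def GoodB (curr lo hi r : Int) : Prop :=
  lo ≤ r ∧ r ≤ hi ∧ 5 * r * (r + 1) ≤ 2 * curr ∧ (r = hi ∨ 2 * curr < 5 * (r + 1) * (r + 2))

theorem cost_mono {a b : Int} (h0 : 0 ≤ a) (hab : a ≤ b) : 5 * a * (a + 1) ≤ 5 * b * (b + 1) := by
  nlinarith

theorem goodB_unique {curr lo hi r1 r2 : Int} (h0 : 0 ≤ lo)
    (h1 : GoodB curr lo hi r1) (h2 : GoodB curr lo hi r2) : r1 = r2 := by
  obtain ⟨a1, b1, c1, d1⟩ := h1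
  obtain ⟨a2, b2, c2, d2⟩ := h2
  by_contra hne
  rcases lt_or_gt_of_ne hne with hlt | hlt
  · rcases d1 with rfl | d1
    · omega
    · have := cost_mono (a := r1 + 1) (b := r2) (by omega) (by omega)
      nlinarith
  · rcases d2 with rfl | d2
    · omega
    · have := cost_mono (a := r2 + 1) (b := r1) (by omega) (by omega)
      nlinarith

theorem floordiv_cost_le {m c : Int} :
    PySem.Int.floordiv (5 * m * (m + 1)) 2 ≤ c ↔ 5 * m * (m + 1) ≤ 2 * c := by
  obtain ⟨t, ht⟩ := Int.even_mul_succ_self m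
  have hx : 5 * m * (m + 1) = 5 * (m * (m + 1)) := by ring
  rw [PySem.Int.floordiv_eq_ediv_of_pos (by omega), hx, ht]
  omega

theorem bsearch_char (curr : Int) :
    ∀ (n : Nat) (lo hi : Int), (hi - lo).toNat ≤ n → lo ≤ hi → 5 * lo * (lo + 1) ≤ 2 * curr →
      GoodB curr lo hi (bsearchB curr n lo hi) := by
  intro n
  induction n with
  | zero =>
    intro lo hi hn hle hP
    have : lo = hi := by omega
    subst this
    exact ⟨le_rfl, le_rfl, hP, Or.inl rfl⟩
  | succ n ih =>
    intro lo hi hn hle hP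
    show GoodB curr lo hi (if lo < hi then _ else lo)
    by_cases h : lo < hi
    · rw [if_pos h]
      have hm := midB_bounds h
      by_cases hc : PySem.Int.floordiv (5 * midB lo hi * (midB lo hi + 1)) 2 ≤ curr
      · rw [if_pos hc]
        have hPm : 5 * midB lo hi * (midB lo hi + 1) ≤ 2 * curr := floordiv_cost_le.mp hc
        obtain ⟨a, b, c, d⟩ := ih (midB lo hi) hi (by omega) (by omega) hPm
        exact ⟨by omega, b, c, d⟩
      · rw [if_neg hc]
        have hPm : ¬ 5 * midB lo hi * (midB lo hi + 1) ≤ 2 * curr := fun hx => hc (floordiv_cost_le.mpr hx)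
        have hg := ih lo (midB lo hi - 1) (by omega) (by omega) hP
        obtain ⟨a, b, c, d⟩ := hg
        refine ⟨a, by omega, c, ?_⟩
        rcases d with hh | d
        · right
          rw [hh]
          have e1 : midB lo hi - 1 + 1 = midB lo hi := by ring
          have e2 : midB lo hi - 1 + 2 = midB lo hi + 1 := by ring
          rw [e1, e2]
          omega
        · exact Or.inr d
    · rw [if_neg h]
      have : lo = hi := by omega
      exact ⟨le_rfl, by omega, hP, Or.inl this⟩

-- the list [1*5, 2*5, …] that A builds, shifted by j
def mkCosts : Int → Nat → List Int
  | _, 0 => []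
  | j, n + 1 => (j + 1) * 5 :: mkCosts (j + 1) n

theorem range_map_eq : ∀ (n : Nat) (j : Int),
    (PySem.List.pyRange (j + 1) (j + 1 + n) 1).map (fun i => i * 5) = mkCosts j n := by
  intro n
  induction n with
  | zero =>
    intro j
    rw [PySem.List.pyRange_one_eq_nil (by omega)]
    rfl
  | succ n ih =>
    intro j
    rw [PySem.List.pyRange_one_cons (by push_cast; omega)]
    have h2 : j + 1 + ((n : Int) + 1) = (j + 1) + 1 + n := by ring
    simp only [List.map_cons, mkCosts]
    push_cast
    rw [h2, ih (j + 1)]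

theorem loopA_char (curr : Int) :
    ∀ (n : Nat) (j c : Int), 0 ≤ j → 5 * j * (j + 1) ≤ 2 * curr → 2 * c = 2 * curr - 5 * j * (j + 1) →
      GoodB curr j (j + n) (loopA (mkCosts j n) c j) := by
  intro n
  induction n with
  | zero =>
    intro j c h0 hP hc
    simp only [mkCosts, loopA, Nat.cast_zero, add_zero]
    exact ⟨le_rfl, le_rfl, hP, Or.inl rfl⟩
  | succ n ih =>
    intro j c h0 hP hc
    have hid : 5 * (j + 1) * (j + 2) = 5 * j * (j + 1) + 10 * (j + 1) := by ring
    simp only [mkCosts, loopA]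
    by_cases h : c ≥ (j + 1) * 5
    · simp only [h, if_true]
      have hP1 : 5 * (j + 1) * ((j + 1) + 1) ≤ 2 * curr := by nlinarith
      have hc1 : 2 * (c - (j + 1) * 5) = 2 * curr - 5 * (j + 1) * ((j + 1) + 1) := by nlinarith
      have hg := ih (j + 1) (c - (j + 1) * 5) (by omega) hP1 hc1
      obtain ⟨a, b, c', d⟩ := hg
      refine ⟨by omega, by push_cast; omega, c', ?_⟩
      rcases d with hh | d
      · left; push_cast; omega
      · exact Or.inr d
    · simp only [h, if_false]
      refine ⟨le_rfl, by omega, hP, Or.inr ?_⟩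
      nlinarith

theorem main_core (lm curr : Int) :
    loopA ((PySem.List.pyRange 1 (lm + 1) 1).map (fun i => i * 5)) curr 0 =
      (if lm ≤ 0 ∨ curr < 0 then 0 else bsearchB curr lm.toNat 0 lm) := by
  by_cases h1 : lm ≤ 0
  · rw [PySem.List.pyRange_one_eq_nil (by omega)]
    simp [h1, loopA]
  · replace h1 : 0 < lm := by omega
    have hrange : (PySem.List.pyRange 1 (lm + 1) 1).map (fun i => i * 5) = mkCosts 0 lm.toNat := by
      have h := range_map_eq lm.toNat 0
      have e1 : (0 : Int) + 1 = 1 := by ring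
      rw [e1, show (1 : Int) + (lm.toNat : Int) = lm + 1 from by omega] at h
      exact h
    rw [hrange]
    by_cases h2 : curr < 0
    · rw [if_pos (Or.inr h2)]
      obtain ⟨n, hn⟩ : ∃ n, lm.toNat = n + 1 := ⟨lm.toNat - 1, by omega⟩
      rw [hn]
      show (if curr ≥ (0 + 1) * 5 then loopA (mkCosts (0 + 1) n) (curr - (0 + 1) * 5) (0 + 1) else 0) = 0
      rw [if_neg (by omega)]
    · replace h2 : 0 ≤ curr := by omega
      rw [if_neg (by omega)]
      have hA := loopA_char curr lm.toNat 0 curr le_rfl (by omega) (by ring)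
      have hB := bsearch_char curr lm.toNat 0 lm (by omega) (by omega) (by omega)
      rw [show ((0 : Int) + (lm.toNat : Int)) = lm by omega] at hA
      exact goodB_unique le_rfl hA hB

theorem main_eq (arr : List Int) : NewYearHurry arr = NewYearHurry_alt arr :=
  main_core (PySem.List.pyGetD arr 0 0) (240 - PySem.List.pyGetD arr (-1) 0)

-- ===== VERDICT (by name: the statement is the Claim_ definition above) =====
theorem NewYearHurry_spec : Claim_equal_NewYearHurry := by
  intro arr _ _
  unfold Spec_NewYearHurry
  exact main_eq arr
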